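-- pv_equiv track=rewrite | github.com/benellylevy/python-course-assignments | day5/DNA_SEQUENCING_EXTAND.py | extract_valid_sequences
-- ===== SOURCE A (Python) =====
-- def extract_valid_sequences(sequence):
--     # אנחנו מגדירים את הנוקלאוטידים התקינים A, C, T, G
--     valid_bases = "ACTG"
--     valid_sequences = []
--     current_sequence = ""
--
--     # רצים על הרצף אות אות עד למפגש עם אות לא תקינה, שם אנחנו שומרים את הרצף ופותחים חדש.
--     for char in sequence:
--         if char in valid_bases:
--             current_sequence += char
--         else:
--             if current_sequence:  # If a valid subsequence is found, add it to the list
--                 valid_sequences.append(current_sequence)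
--                 current_sequence = ""  # Reset for a new subsequence
--
--     if current_sequence:  # If there's a valid subsequence left after the loop, add it
--         valid_sequences.append(current_sequence)
--
--     return valid_sequences
-- ===== SOURCE B (Python) =====
-- def extract_valid_sequences(sequence):
--     valid = "ACTG"
--     result = []
--     i, n = 0, len(sequence)
--     while i < n:
--         if sequence[i] in valid:
--             j = i
--             while j < n and sequence[j] in valid:
--                 j += 1
--             result.append(sequence[i:j])
--             i = j
--         else:
--             i += 1
--     return result
-- ===== Notes on version B (the rewrite author's own statement) =====
-- stated objective: alternative
-- what changed: Replaces A's char-by-char accumulator with flush-on-invalid-and-at-end by an index-based scan that, at each valid character, advances a second pointer to the end of the run and slices it out in one step; no growing string and no end-of-loop flush.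
import Mathlib
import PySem

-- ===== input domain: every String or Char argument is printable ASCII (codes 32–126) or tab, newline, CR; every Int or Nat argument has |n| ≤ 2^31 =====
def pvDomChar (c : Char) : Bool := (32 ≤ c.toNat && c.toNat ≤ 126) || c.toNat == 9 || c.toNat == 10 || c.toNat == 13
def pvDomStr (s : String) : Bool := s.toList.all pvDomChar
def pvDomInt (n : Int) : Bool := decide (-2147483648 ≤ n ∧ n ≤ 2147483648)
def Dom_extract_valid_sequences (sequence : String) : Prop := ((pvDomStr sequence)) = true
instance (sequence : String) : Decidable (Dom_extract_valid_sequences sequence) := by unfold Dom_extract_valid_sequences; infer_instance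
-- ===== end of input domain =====

-- B replaces A's accumulator-and-flush loop by an index scan that finds each
-- maximal ACTG run and slices it out in one step (alternative decomposition).

-- ===== PORT A =====
-- 'char in "ACTG"' (membership of a single char in the string of valid bases)
def pvIsBase (c : Char) : Bool := "ACTG".toList.contains c

-- A's loop state: (valid_sequences, current_sequence); current kept as List Char
-- (Python's string accumulation 'current_sequence += char' is the append; exact).
def pvStepA (st : List String × List Char) (c : Char) : List String × List Char :=
  if pvIsBase c then (st.1, st.2 ++ [c])
  else if st.2 ≠ [] then (st.1 ++ [String.ofList st.2], [])
  else st

def extract_valid_sequences (sequence : String) : List String :=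
  let st := sequence.toList.foldl pvStepA ([], [])
  if st.2 ≠ [] then st.1 ++ [String.ofList st.2] else st.1

-- ===== PORT B =====
-- Source B: outer index loop; at a valid char scan forward to the end of the run
-- (inner while = takeWhile / dropWhile) and slice it out; at an invalid char skip.
def pvRunsB : List Char → List String
  | [] => []
  | c :: rest =>
    if pvIsBase c then
      String.ofList (c :: rest.takeWhile pvIsBase) :: pvRunsB (rest.dropWhile pvIsBase)
    else
      pvRunsB rest
termination_by cs => cs.length
decreasing_by
  · simpa using Nat.lt_succ_of_le (List.length_dropWhile_le pvIsBase rest)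
  · simp

def extract_valid_sequences_alt (sequence : String) : List String :=
  pvRunsB sequence.toList

-- ===== PRECONDITION & SPEC =====
def Spec_extract_valid_sequences (sequence : String) (out : List String) : Prop := out = extract_valid_sequences_alt sequence
instance (sequence : String) (out : List String) : Decidable (Spec_extract_valid_sequences sequence out) := by unfold Spec_extract_valid_sequences; infer_instance

-- ===== CLAIM (what is proved, stated in full; the proofs are below) =====
def Claim_equal_extract_valid_sequences : Prop := ∀ (sequence : String), Dom_extract_valid_sequences sequence → Spec_extract_valid_sequences sequence (extract_valid_sequences sequence)

-- ===== LEMMAS AND PROOFS =====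

-- A's loop only ever appends to the first component.
theorem pvStepA_split (vs : List String) (cur : List Char) (c : Char) :
    pvStepA (vs, cur) c
      = (vs ++ (pvStepA ([], cur) c).1, (pvStepA ([], cur) c).2) := by
  simp only [pvStepA]; split_ifs <;> simp

theorem pvFoldA_append (cs : List Char) (vs : List String) (cur : List Char) :
    cs.foldl pvStepA (vs, cur)
      = (vs ++ (cs.foldl pvStepA ([], cur)).1, (cs.foldl pvStepA ([], cur)).2) := by
  induction cs generalizing vs cur with
  | nil => simp
  | cons c cs ih =>
    simp only [List.foldl_cons]
    rw [pvStepA_split vs cur c]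
    rw [ih (vs ++ (pvStepA ([], cur) c).1) (pvStepA ([], cur) c).2]
    conv_rhs => rw [← Prod.mk.eta (p := pvStepA ([], cur) c)]
    rw [ih (pvStepA ([], cur) c).1]
    simp

def pvFinishA (st : List String × List Char) : List String :=
  if st.2 ≠ [] then st.1 ++ [String.ofList st.2] else st.1

theorem pvFinishA_append (vs : List String) (st : List String × List Char) :
    pvFinishA (vs ++ st.1, st.2) = vs ++ pvFinishA st := by
  unfold pvFinishA; split_ifs <;> simp

theorem pvMain (cs cur : List Char) :
    pvFinishA (cs.foldl pvStepA ([], cur))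
      = if cur = [] then pvRunsB cs
        else String.ofList (cur ++ cs.takeWhile pvIsBase)
              :: pvRunsB (cs.dropWhile pvIsBase) := by
  induction cs generalizing cur with
  | nil =>
    by_cases h : cur = [] <;> simp [pvFinishA, pvRunsB, h]
  | cons c cs ih =>
    simp only [List.foldl_cons]
    by_cases hb : pvIsBase c
    · have e : pvStepA ([], cur) c = ([], cur ++ [c]) := by simp [pvStepA, hb]
      rw [e, ih (cur ++ [c])]
      have hne : cur ++ [c] ≠ [] := by simp
      by_cases h : cur = [] <;>
        simp [h, hne, pvRunsB, hb]
    · by_cases h : cur = []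
      · have e : pvStepA ([], cur) c = ([], []) := by simp [pvStepA, hb, h]
        rw [e, ih []]
        simp [h, pvRunsB, hb]
      · have e : pvStepA ([], cur) c = ([String.ofList cur], []) := by
          simp [pvStepA, hb, h]
        rw [e, pvFoldA_append cs [String.ofList cur] [], pvFinishA_append, ih []]
        simp [h, pvRunsB, hb]

-- ===== VERDICT (by name: the statement is the Claim_ definition above) =====
theorem extract_valid_sequences_spec : Claim_equal_extract_valid_sequences := by
  intro s _
  show extract_valid_sequences s = extract_valid_sequences_alt s
  have h := pvMain s.toList []
  simpa [extract_valid_sequences, extract_valid_sequences_alt, pvFinishA] using h
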